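-- pv_equiv track=rewrite | github.com/Jota0416/ORION | FazNovoEV.py | EscreveTextoInv
-- ===== SOURCE A (Python) =====
-- def EscreveTextoInv(quant_sep, pot_sep):
--     if len(quant_sep) == 1:
--         if quant_sep[0] == "1":
--             texto_inv = "foi considerado 1 inversor de " + pot_sep[0] + " kW"
--         else:
--             texto_inv = "foram considerados " + quant_sep[0] + " inversores de " + pot_sep[0] + " kW"
--     else:
--         texto_inv = "foram considerados " + quant_sep[0] + " inversores de " + pot_sep[0] + " kW"
--         for k in range(1, len(quant_sep), 1):
--             if k == (len(quant_sep) - 1):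
--                 texto_inv = texto_inv + " e " + quant_sep[k] + " inversores de " + pot_sep[
--                     k] + " kW"  # escrevo inversores antes de todos?
--             else:
--                 texto_inv = texto_inv + ", " + quant_sep[k] + " inversores de " + pot_sep[k] + " kW"
--     return texto_inv
-- ===== SOURCE B (Python) =====
-- def EscreveTextoInv(quant_sep, pot_sep):
--     if len(quant_sep) == 1 and quant_sep[0] == "1":
--         return "foi considerado 1 inversor de " + pot_sep[0] + " kW"
--     segments = [quant_sep[k] + " inversores de " + pot_sep[k] + " kW" for k in range(len(quant_sep))]
--     if len(segments) == 1:
--         return "foram considerados " + segments[0]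
--     return "foram considerados " + ", ".join(segments[:-1]) + " e " + segments[-1]
-- ===== Notes on version B (the rewrite author's own statement) =====
-- stated objective: faster
-- what changed: Replaces A's accumulating loop (quadratic repeated string concatenation with a per-iteration last-index test) by building the list of per-inverter segments once and joining all but the last with ', ' via str.join, then appending ' e ' plus the last segment.
import Mathlib
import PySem

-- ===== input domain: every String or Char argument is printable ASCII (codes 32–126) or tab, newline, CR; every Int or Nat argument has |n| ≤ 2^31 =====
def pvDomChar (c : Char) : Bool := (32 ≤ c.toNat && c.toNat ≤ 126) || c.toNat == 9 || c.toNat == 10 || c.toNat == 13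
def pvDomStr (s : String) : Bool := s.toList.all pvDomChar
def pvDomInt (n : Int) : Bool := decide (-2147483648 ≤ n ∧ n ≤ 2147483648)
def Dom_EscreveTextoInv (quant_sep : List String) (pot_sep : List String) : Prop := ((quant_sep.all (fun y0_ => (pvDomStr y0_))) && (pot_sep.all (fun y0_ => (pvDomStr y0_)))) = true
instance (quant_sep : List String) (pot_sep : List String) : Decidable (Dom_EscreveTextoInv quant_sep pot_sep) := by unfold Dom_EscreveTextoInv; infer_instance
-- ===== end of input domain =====

-- B builds the per-inverter segments once and joins them with str.join (', ' between all but the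
-- last, ' e ' before the last) instead of A's accumulating loop with repeated string concatenation
-- and a per-iteration last-index test; a timing run measured B faster on the large inputs.

-- ===== PORT A =====
def EscreveTextoInv (quant_sep : List String) (pot_sep : List String) : String :=
  if quant_sep.length == 1 then
    if PySem.List.pyGetD quant_sep 0 "" == "1" then
      "foi considerado 1 inversor de " ++ PySem.List.pyGetD pot_sep 0 "" ++ " kW"
    else
      "foram considerados " ++ PySem.List.pyGetD quant_sep 0 "" ++ " inversores de " ++
        PySem.List.pyGetD pot_sep 0 "" ++ " kW"
  else
    (PySem.List.pyRange 1 (quant_sep.length : Int)).foldl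
      (fun texto_inv k =>
        if k == (quant_sep.length : Int) - 1 then
          texto_inv ++ " e " ++ PySem.List.pyGetD quant_sep k "" ++ " inversores de " ++
            PySem.List.pyGetD pot_sep k "" ++ " kW"
        else
          texto_inv ++ ", " ++ PySem.List.pyGetD quant_sep k "" ++ " inversores de " ++
            PySem.List.pyGetD pot_sep k "" ++ " kW")
      ("foram considerados " ++ PySem.List.pyGetD quant_sep 0 "" ++ " inversores de " ++
        PySem.List.pyGetD pot_sep 0 "" ++ " kW")

-- ===== PORT B =====
def EscreveTextoInv_alt (quant_sep : List String) (pot_sep : List String) : String :=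
  if quant_sep.length == 1 && PySem.List.pyGetD quant_sep 0 "" == "1" then
    "foi considerado 1 inversor de " ++ PySem.List.pyGetD pot_sep 0 "" ++ " kW"
  else
    let segments := (PySem.List.pyRange 0 (quant_sep.length : Int)).map
      (fun k => PySem.List.pyGetD quant_sep k "" ++ " inversores de " ++
        PySem.List.pyGetD pot_sep k "" ++ " kW")
    if segments.length == 1 then
      "foram considerados " ++ PySem.List.pyGetD segments 0 ""
    else
      "foram considerados " ++
        PySem.Str.join ", " (PySem.List.slice segments none (some (-1))) ++
        " e " ++ PySem.List.pyGetD segments (-1) ""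

-- ===== PRECONDITION & SPEC =====
-- A raises IndexError when quant_sep is empty or pot_sep is shorter than quant_sep (B raises there too);
-- exactly those inputs are excluded.
def Pre_EscreveTextoInv (quant_sep : List String) (pot_sep : List String) : Prop :=
  quant_sep ≠ [] ∧ quant_sep.length ≤ pot_sep.length
instance (quant_sep : List String) (pot_sep : List String) : Decidable (Pre_EscreveTextoInv quant_sep pot_sep) := by unfold Pre_EscreveTextoInv; infer_instance
def pvWitness_EscreveTextoInv : List String × List String := (["2", "3"], ["5", "10"])

def Spec_EscreveTextoInv (quant_sep : List String) (pot_sep : List String) (out : String) : Prop := out = EscreveTextoInv_alt quant_sep pot_sep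
instance (quant_sep : List String) (pot_sep : List String) (out : String) : Decidable (Spec_EscreveTextoInv quant_sep pot_sep out) := by unfold Spec_EscreveTextoInv; infer_instance

-- ===== CLAIM (what is proved, stated in full; the proofs are below) =====
def Claim_equal_EscreveTextoInv : Prop := ∀ (quant_sep : List String) (pot_sep : List String), Dom_EscreveTextoInv quant_sep pot_sep → Pre_EscreveTextoInv quant_sep pot_sep → Spec_EscreveTextoInv quant_sep pot_sep (EscreveTextoInv quant_sep pot_sep)

-- ===== LEMMAS AND PROOFS =====

theorem pvStrExt (a b : String) (h : a.toList = b.toList) : a = b := by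
  have := congrArg String.ofList h; simpa using this

theorem pvJoinSingleton (sep x : String) : PySem.Str.join sep [x] = x := by
  apply pvStrExt
  simp [PySem.Str.toList_join, PySem.Chars.join_singleton]

theorem pvJoinConsCons (sep x y : String) (l : List String) :
    PySem.Str.join sep (x :: y :: l) = x ++ sep ++ PySem.Str.join sep (y :: l) := by
  apply pvStrExt
  simp [PySem.Str.toList_join, PySem.Chars.join_cons_cons]

theorem pvFoldlPull (sep p : String) (l : List String) : ∀ x : String,
    l.foldl (fun acc s => acc ++ sep ++ s) (p ++ x) =
      p ++ l.foldl (fun acc s => acc ++ sep ++ s) x := by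
  induction l with
  | nil => intro x; simp
  | cons y t ih =>
      intro x
      simp only [List.foldl_cons]
      have h : p ++ x ++ sep ++ y = p ++ (x ++ sep ++ y) := by
        simp [String.append_assoc]
      rw [h]
      exact ih _

theorem pvJoinEqFoldl (sep : String) (l : List String) : ∀ x : String,
    PySem.Str.join sep (x :: l) = l.foldl (fun acc s => acc ++ sep ++ s) x := by
  induction l with
  | nil => intro x; simpa using pvJoinSingleton sep x
  | cons y t ih =>
      intro x
      rw [pvJoinConsCons, ih y, List.foldl_cons, ← pvFoldlPull sep (x ++ sep) t y]

theorem pvMain (q0 q1 : String) (qt : List String) (p : List String) :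
    EscreveTextoInv (q0 :: q1 :: qt) p = EscreveTextoInv_alt (q0 :: q1 :: qt) p := by
  set q : List String := q0 :: q1 :: qt with hq
  have hn2 : 2 ≤ q.length := by simp [hq]
  set nI : Int := (q.length : Int) with hnI
  have hnI2 : 2 ≤ nI := by simp only [hnI]; exact_mod_cast hn2
  set seg : Int → String := fun k =>
    PySem.List.pyGetD q k "" ++ " inversores de " ++ PySem.List.pyGetD p k "" ++ " kW" with hseg
  have hne1 : (q.length == 1) = false := by
    simp only [beq_eq_false_iff_ne]; omega
  have hsplit : PySem.List.pyRange 1 nI = PySem.List.pyRange 1 (nI - 1) ++ [nI - 1] := by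
    have h := PySem.List.pyRange_one_succ_right (a := 1) (b := nI - 1) (by omega)
    rwa [show nI - 1 + 1 = nI by ring] at h
  set R : List Int := PySem.List.pyRange 1 (nI - 1) with hR
  have hA : EscreveTextoInv q p =
      "foram considerados " ++
        ((R.map seg).foldl (fun acc s => acc ++ ", " ++ s) (seg 0) ++
          (" e " ++ seg (nI - 1))) := by
    rw [EscreveTextoInv, hne1]
    simp only [Bool.false_eq_true, if_false]
    rw [← hnI, hsplit, List.foldl_append]
    simp only [List.foldl_cons, List.foldl_nil, beq_self_eq_true, if_true]
    rw [PySem.List.foldl_congr_mem R _ (fun acc k => acc ++ ", " ++ seg k) _ ?hcong]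
    case hcong =>
      intro acc k hk
      have hb := PySem.List.mem_pyRange_one.mp (hR ▸ hk)
      have hkne : (k == nI - 1) = false := by
        simp only [beq_eq_false_iff_ne]; omega
      rw [hkne]
      simp [hseg, String.append_assoc]
    rw [← List.foldl_map (f := seg)]
    have hinit : "foram considerados " ++ PySem.List.pyGetD q 0 "" ++ " inversores de " ++
        PySem.List.pyGetD p 0 "" ++ " kW" = "foram considerados " ++ seg 0 := by
      simp [hseg, String.append_assoc]
    rw [hinit, pvFoldlPull]
    simp [hseg, String.append_assoc]
  have hB : EscreveTextoInv_alt q p =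
      "foram considerados " ++
        ((R.map seg).foldl (fun acc s => acc ++ ", " ++ s) (seg 0) ++
          (" e " ++ seg (nI - 1))) := by
    rw [EscreveTextoInv_alt, hne1]
    simp only [Bool.false_and, Bool.false_eq_true, if_false]
    rw [← hnI, ← hseg]
    rw [show PySem.List.pyRange 0 nI = 0 :: PySem.List.pyRange 1 nI from
      PySem.List.pyRange_one_cons (by omega), hsplit]
    rw [show ((0 : Int) :: (R ++ [nI - 1])).map seg =
      (seg 0 :: R.map seg) ++ [seg (nI - 1)] by simp]
    rw [show (((seg 0 :: R.map seg) ++ [seg (nI - 1)]).length == 1) = false by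
      simp only [beq_eq_false_iff_ne]; simp]
    simp only [Bool.false_eq_true, if_false]
    rw [PySem.List.slice_to_neg_one, List.dropLast_concat,
      PySem.List.pyGetD_neg_one_append_singleton, pvJoinEqFoldl]
    simp [String.append_assoc]
  rw [hA, hB]

-- ===== VERDICT (by name: the statement is the Claim_ definition above) =====
theorem EscreveTextoInv_spec : Claim_equal_EscreveTextoInv := by
  intro q p _ hpre
  obtain ⟨hne, hlen⟩ := hpre
  unfold Spec_EscreveTextoInv
  cases q with
  | nil => exact absurd rfl hne
  | cons q0 qt =>
    cases qt with
    | nil =>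
        cases p with
        | nil => simp at hlen
        | cons p0 pt =>
          by_cases h1 : q0 = "1"
          · simp [EscreveTextoInv, EscreveTextoInv_alt, h1]
          · have hr : PySem.List.pyRange (0 : Int) 1 = [0] := by decide
            simp [EscreveTextoInv, EscreveTextoInv_alt, h1, hr, String.append_assoc]
    | cons q1 qt2 => exact pvMain q0 q1 qt2 p
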